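/- GENERATED by farm/mkstatement.py from design/units.tsv (unit `DGifGetImageHeader.COMPOSITION`) and the Specs of Gif/Spec/*.lean — do not edit.
   THE STATEMENT of the proof unit `DGifGetImageHeader.COMPOSITION`: the function `DGifGetImageHeader` (189 instructions) satisfies its contract,
   GIVEN THE STATEMENTS OF ITS 8 SEGMENTS (`Gif.Spec.DGifGetImageHeader.Seg<k> Lay μ u₀`: what the unit `DGifGetImageHeader.<k>` proves).
   No machine code is walked: `ReachVia.trans` along the segments (the exit assertion of a segment is the entry assertion of
   its successor), an induction on the loop measures. What the names mean: ProgX/Base/Spec/Basic.lean. The theorem to prove: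
   `theorem DGifGetImageHeader_COMPOSITION_ok : Gif.Spec.DGifGetImageHeader_COMPOSITION.Statement`. -/
import Gif.Code
import Gif.Dec.All
import Gif.Labels
import Gif.Spec.Desc
import Gif.Spec.Seg_DGifGetImageHeader
namespace Gif.Spec.DGifGetImageHeader_COMPOSITION
open X86 X86.User Asan

/-- The statement of unit `DGifGetImageHeader.COMPOSITION`. -/
def Statement : Prop :=
  ∀ (Lay : Layout) (_hLay : Lay.hi = 0x1000000) (μ : Microarch) (_hμ : UserX.MicroOK μ) (u₀ : State)
    (_h_DGifGetImageHeader_P : Gif.Spec.DGifGetImageHeader.SegP Lay μ u₀)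
    (_h_DGifGetImageHeader_1 : Gif.Spec.DGifGetImageHeader.Seg1 Lay μ u₀)
    (_h_DGifGetImageHeader_2 : Gif.Spec.DGifGetImageHeader.Seg2 Lay μ u₀)
    (_h_DGifGetImageHeader_3 : Gif.Spec.DGifGetImageHeader.Seg3 Lay μ u₀)
    (_h_DGifGetImageHeader_4 : Gif.Spec.DGifGetImageHeader.Seg4 Lay μ u₀)
    (_h_DGifGetImageHeader_5 : Gif.Spec.DGifGetImageHeader.Seg5 Lay μ u₀)
    (_h_DGifGetImageHeader_6 : Gif.Spec.DGifGetImageHeader.Seg6 Lay μ u₀)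
    (_h_DGifGetImageHeader_E : Gif.Spec.DGifGetImageHeader.SegE Lay μ u₀),
    ∀ (H : Heap) (rest : List Obj) (frames : List (Nat × FrameLayout)) (F : Forest) (R : Rd), Calls Lay μ ProgX.Base.WayInv (ProgX.Base.conv u₀) Gif.L.DGifGetImageHeader.entry (Gif.Spec.DGifGetImageHeader.spec H rest frames F R)

end Gif.Spec.DGifGetImageHeader_COMPOSITION
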